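-- pv_equiv track=rewrite | github.com/KULeuven-MICAS/snax-mlir | snaxc/ir/dart/scheduler.py | generate_valid_multidim_factors
-- ===== SOURCE A (Python) =====
-- def get_all_divisors_with_factors(prime_factors: list) -> dict:
--     """
--     Generate all possible divisors from a list of prime factors along with
--     the prime factors used to create each divisor.
--     Returns a dict mapping divisor -> list of prime factors used.
--     For example, [2, 2, 3] produces {1: [], 2: [2], 3: [3], 4: [2, 2], 6: [2, 3], 12: [2, 2, 3]}.
--     """
--     if not prime_factors:
--         return {1: []}
--
--     # Start with divisor 1 using no prime factors
--     divisors = {1: []}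
--
--     for prime in prime_factors:
--         new_divisors = {}
--         for divisor, factors_used in divisors.items():
--             new_divisor = divisor * prime
--             new_factors = factors_used + [prime]
--             new_divisors[new_divisor] = new_factors
--         divisors.update(new_divisors)
--
--     return divisors
--
-- def generate_valid_multidim_factors(matrix_sizes, dims, limit):
--     """
--     Yields (tiling_list, used_factors_map).
--     tiling_list: list of (dim, size, False)
--     used_factors_map: dict[dim, list[factors]]
--     """
--     if not dims:
--         yield [], {}
--         return
--
--     first_dim = dims[0]
--     rest_dims = dims[1:]
--
--     divisors = get_all_divisors_with_factors(matrix_sizes[first_dim])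
--
--     for size, factors in divisors.items():
--         if size > limit:
--             continue
--
--         new_limit = limit // size
--
--         for rest_tiling, rest_factors in generate_valid_multidim_factors(matrix_sizes, rest_dims, new_limit):
--             current_tiling = []
--             if size > 1:
--                 current_tiling.append((first_dim, size, False))
--             current_tiling.extend(rest_tiling)
--
--             current_factors = {first_dim: factors}
--             current_factors.update(rest_factors)
--
--             yield current_tiling, current_factors
-- ===== SOURCE B (Python) =====
-- def get_all_divisors_with_factors(prime_factors: list) -> dict:
--     """Same-module helper (shared with A): divisor -> prime factors used."""
--     if not prime_factors:
--         return {1: []}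
--     divisors = {1: []}
--     for prime in prime_factors:
--         new_divisors = {}
--         for divisor, factors_used in divisors.items():
--             new_divisors[divisor * prime] = factors_used + [prime]
--         divisors.update(new_divisors)
--     return divisors
--
--
-- def generate_valid_multidim_factors(matrix_sizes, dims, limit):
--     """Iterative breadth-first enumeration: each dimension's divisor table is
--     computed once, and partial combinations are extended level by level while
--     carrying the remaining limit; valid full combinations are then yielded."""
--     combos = [([], {}, limit)]
--     for d in dims:
--         options = list(get_all_divisors_with_factors(matrix_sizes[d]).items())
--         new_combos = []
--         for tiling, fmap, rem in combos:
--             for size, facs in options: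
--                 if size > rem:
--                     continue
--                 new_combos.append(
--                     (tiling + ([(d, size, False)] if size > 1 else []),
--                      {**fmap, d: facs},
--                      rem // size))
--         combos = new_combos
--     for tiling, fmap, _ in combos:
--         yield tiling, fmap
-- ===== Notes on version B (the rewrite author's own statement) =====
-- stated objective: alternative
-- what changed: Replaces A's recursive generator (which re-derives the divisor table of each remaining dimension at every recursive call and prunes via nested yields) with an iterative breadth-first fold: each dimension's divisor table is computed once, partial combinations carrying the remaining limit are extended level by level in one explicit list, and the finished combinations are yielded at the end.
-- outside the precondition, e.g. on generate_valid_multidim_factors({0: [2]}, [0, -3], -7): A returns [], B raises KeyError; on generate_valid_multidim_factors({0: [0]}, [0], -1): A returns [], B returns []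
import Mathlib
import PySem

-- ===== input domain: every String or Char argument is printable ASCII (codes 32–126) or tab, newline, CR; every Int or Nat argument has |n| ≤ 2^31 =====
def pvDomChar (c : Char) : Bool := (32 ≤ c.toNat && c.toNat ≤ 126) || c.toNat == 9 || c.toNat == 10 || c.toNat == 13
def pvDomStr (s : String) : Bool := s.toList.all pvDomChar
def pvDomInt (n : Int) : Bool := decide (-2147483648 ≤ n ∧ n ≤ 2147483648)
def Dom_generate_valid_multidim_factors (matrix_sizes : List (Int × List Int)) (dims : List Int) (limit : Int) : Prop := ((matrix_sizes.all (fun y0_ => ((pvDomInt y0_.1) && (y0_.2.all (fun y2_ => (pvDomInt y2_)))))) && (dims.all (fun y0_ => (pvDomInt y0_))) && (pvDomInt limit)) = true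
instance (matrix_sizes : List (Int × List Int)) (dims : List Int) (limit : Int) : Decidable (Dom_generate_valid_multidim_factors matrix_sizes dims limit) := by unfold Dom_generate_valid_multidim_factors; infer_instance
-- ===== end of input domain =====

-- B replaces A's recursive generator by an iterative level-by-level product fold that
-- computes each dimension's divisor table once (objective: alternative decomposition).

-- ===== PORT A =====
-- shared same-module helper, called by both Pythons (A and B)
def get_all_divisors_with_factors (prime_factors : List Int) : PySem.Dict Int (List Int) :=
  if prime_factors = [] then PySem.Dict.mk [(1, [])]
  else
    prime_factors.foldl (fun divisors prime =>
      let new_divisors := divisors.items.foldl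
        (fun nd df => nd.insert (df.1 * prime) (df.2 ++ [prime])) (PySem.Dict.mk [])
      divisors.update new_divisors.items)
      (PySem.Dict.mk [(1, [])])

-- literal port of A: recursion on dims, pruning with `size > limit` and `limit // size`
-- (matrix_sizes[first_dim] is ported with get?/getD; the `none` case is excluded by Pre_)
def generate_valid_multidim_factors (matrix_sizes : List (Int × List Int)) (dims : List Int) (limit : Int) : List ((List (Int × Int × Bool)) × (List (Int × List Int))) :=
  match dims with
  | [] => [([], [])]
  | first_dim :: rest_dims =>
    let divisors := get_all_divisors_with_factors (((PySem.Dict.mk matrix_sizes).get? first_dim).getD [])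
    divisors.items.foldl (fun acc sf =>
      if sf.1 > limit then acc
      else
        acc ++ (generate_valid_multidim_factors matrix_sizes rest_dims (PySem.Int.floordiv limit sf.1)).map
          (fun rr => ((if sf.1 > 1 then [(first_dim, sf.1, false)] else []) ++ rr.1,
                      ((PySem.Dict.mk [(first_dim, sf.2)]).update rr.2).items))) []

-- ===== PORT B =====
-- literal port of Source B: one pass over dims extending a combo list (tiling, factor map,
-- remaining limit), then a final projection pass ({**fmap, d: facs} = Dict.insert)
def generate_valid_multidim_factors_alt (matrix_sizes : List (Int × List Int)) (dims : List Int) (limit : Int) : List ((List (Int × Int × Bool)) × (List (Int × List Int))) :=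
  let combos := dims.foldl (fun combos d =>
      let options := (get_all_divisors_with_factors (((PySem.Dict.mk matrix_sizes).get? d).getD [])).items
      combos.foldl (fun new_combos c =>
        options.foldl (fun new_combos sf =>
          if sf.1 > c.2.2 then new_combos
          else new_combos ++ [(c.1 ++ (if sf.1 > 1 then [(d, sf.1, false)] else []),
                               ((PySem.Dict.mk c.2.1).insert d sf.2).items,
                               PySem.Int.floordiv c.2.2 sf.1)]) new_combos) [])
    [([], [], limit)]
  combos.map (fun c => (c.1, c.2.1))

-- ===== PRECONDITION & SPEC =====
-- Pre_ excludes dims that are not keys of matrix_sizes (Python A raises KeyError when it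
-- reaches such a dim) and factor lists containing 0 (A raises ZeroDivisionError when a
-- zero divisor is reached with a non-negative running limit); whether A actually reaches
-- the faulty dim/divisor is path-dependent, so Pre_ excludes a few inputs on which A
-- still returns (see the claim's cites).
def Pre_generate_valid_multidim_factors (matrix_sizes : List (Int × List Int)) (dims : List Int) (limit : Int) : Prop :=
  ∀ d ∈ dims, ((PySem.Dict.mk matrix_sizes).get? d).isSome = true ∧
    ∀ x ∈ ((PySem.Dict.mk matrix_sizes).get? d).getD [], x ≠ 0
instance (matrix_sizes : List (Int × List Int)) (dims : List Int) (limit : Int) : Decidable (Pre_generate_valid_multidim_factors matrix_sizes dims limit) := by unfold Pre_generate_valid_multidim_factors; infer_instance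

def pvWitness_generate_valid_multidim_factors : (List (Int × List Int)) × List Int × Int :=
  ([(0, [2, 3]), (1, [2])], [0, 1], 6)

def Spec_generate_valid_multidim_factors (matrix_sizes : List (Int × List Int)) (dims : List Int) (limit : Int) (out : List ((List (Int × Int × Bool)) × (List (Int × List Int)))) : Prop := out = generate_valid_multidim_factors_alt matrix_sizes dims limit
instance (matrix_sizes : List (Int × List Int)) (dims : List Int) (limit : Int) (out : List ((List (Int × Int × Bool)) × (List (Int × List Int)))) : Decidable (Spec_generate_valid_multidim_factors matrix_sizes dims limit out) := by unfold Spec_generate_valid_multidim_factors; infer_instance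

-- ===== CLAIM (what is proved, stated in full; the proofs are below) =====
def Claim_equal_generate_valid_multidim_factors : Prop := ∀ (matrix_sizes : List (Int × List Int)) (dims : List Int) (limit : Int), Dom_generate_valid_multidim_factors matrix_sizes dims limit → Pre_generate_valid_multidim_factors matrix_sizes dims limit → Spec_generate_valid_multidim_factors matrix_sizes dims limit (generate_valid_multidim_factors matrix_sizes dims limit)

-- ===== LEMMAS AND PROOFS =====

-- the combo state of B: (tiling, factor-map items, remaining limit)
abbrev PVC : Type := List (Int × Int × Bool) × List (Int × List Int) × Int

def pvF (ms : List (Int × List Int)) (d : Int) (c : PVC) : List PVC :=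
  ((get_all_divisors_with_factors (((PySem.Dict.mk ms).get? d).getD [])).items).flatMap
    (fun sf => if sf.1 > c.2.2 then []
      else [(c.1 ++ (if sf.1 > 1 then [(d, sf.1, false)] else []),
             ((PySem.Dict.mk c.2.1).insert d sf.2).items,
             PySem.Int.floordiv c.2.2 sf.1)])

def pvLevel (ms : List (Int × List Int)) (dims : List Int) (cs : List PVC) : List PVC :=
  dims.foldl (fun cs d => cs.flatMap (pvF ms d)) cs

-- 'if p: continue / else append' loop shape
lemma pv_foldl_if_skip {α β : Type} (P : α → Prop) [DecidablePred P] (g : α → List β) :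
    ∀ (l : List α) (acc : List β),
      l.foldl (fun a x => if P x then a else a ++ g x) acc
        = acc ++ l.flatMap (fun x => if P x then [] else g x) := by
  intro l
  induction l with
  | nil => intro acc; simp
  | cons x t ih =>
    intro acc
    simp only [List.foldl_cons, List.flatMap_cons]
    by_cases h : P x
    · simp [h, ih]
    · simp [h, ih (acc ++ g x), List.append_assoc]

lemma pv_map_replace_eq_self {ν : Type} (k : Int) (v : ν) (l : List (Int × ν))
    (h : ∀ p ∈ l, p.1 ≠ k) :
    l.map (fun p => if p.1 == k then (k, v) else p) = l := by
  conv_rhs => rw [← List.map_id l]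
  apply List.map_congr_left
  intro p hp
  simp [h p hp]

lemma pv_items_insert_cons {ν : Type} (k a : Int) (v b : ν) (t : List (Int × ν)) (h : k ≠ a) :
    ((PySem.Dict.mk ((a, b) :: t)).insert k v).items
      = (a, b) :: ((PySem.Dict.mk t).insert k v).items := by
  have hne : (a == k) = false := by simp [(Ne.symm h)]
  by_cases hc : (PySem.Dict.mk t).contains k
  · have hc' : (PySem.Dict.mk ((a, b) :: t)).contains k = true := by
      simp only [PySem.Dict.contains_mk] at hc ⊢; simp [hc]
    simp only [PySem.Dict.items_insert, hc, hc', if_true, List.map_cons, hne,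
      Bool.false_eq_true, if_false]
  · have hc' : (PySem.Dict.mk ((a, b) :: t)).contains k = false := by
      simp only [PySem.Dict.contains_mk] at hc ⊢; simp [hc, hne]
    simp [PySem.Dict.items_insert, hc, hc']

lemma pv_insert_comm_of_contains {ν : Type} (d : PySem.Dict Int ν) (a x : Int) (v y : ν)
    (ha : d.contains a = true) (hax : a ≠ x) :
    (d.insert a v).insert x y = (d.insert x y).insert a v := by
  apply PySem.Dict.ext
  by_cases hx : d.contains x
  · have h1 : (d.insert a v).contains x = true := by simp [PySem.Dict.contains_insert, hx]
    have h2 : (d.insert x y).contains a = true := by simp [PySem.Dict.contains_insert, ha]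
    simp only [PySem.Dict.items_insert, h1, h2, ha, hx, if_true, List.map_map]
    apply List.map_congr_left
    intro p _
    by_cases hpa : p.1 = a <;> by_cases hpx : p.1 = x <;>
      simp_all [Function.comp]
  · have h1 : (d.insert a v).contains x = false := by
      simp only [PySem.Dict.contains_insert, hx, Bool.or_false, beq_eq_false_iff_ne, ne_eq]
      exact fun e => hax e.symm
    have h2 : (d.insert x y).contains a = true := by simp [PySem.Dict.contains_insert, ha]
    simp only [PySem.Dict.items_insert, h1, h2, ha, hx, if_true, Bool.false_eq_true, if_false,
      List.map_append, List.map_cons, List.map_nil]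
    have hxa : (x == a) = false := by
      simp only [beq_eq_false_iff_ne, ne_eq]; exact fun e => hax e.symm
    simp [hxa]

lemma pv_update_insert_left {ν : Type} (t : List (Int × ν)) :
    ∀ (d : PySem.Dict Int ν) (a : Int) (v : ν),
      d.contains a = true → a ∉ t.map Prod.fst →
      (d.update t).insert a v = (d.insert a v).update t := by
  induction t with
  | nil => intro d a v _ _; rfl
  | cons xy t ih =>
    intro d a v ha hnot
    simp only [List.map_cons, List.mem_cons, not_or] at hnot
    obtain ⟨hax, hnt⟩ := hnot
    have : (d.insert a v).update (xy :: t) = ((d.insert xy.1 xy.2).insert a v).update t := by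
      rw [show (d.insert a v).update (xy :: t) = ((d.insert a v).insert xy.1 xy.2).update t from rfl,
          pv_insert_comm_of_contains d a xy.1 v xy.2 ha (fun e => hax e)]
    rw [this, show d.update (xy :: t) = (d.insert xy.1 xy.2).update t from rfl]
    exact ih (d.insert xy.1 xy.2) a v (by simp [PySem.Dict.contains_insert, ha]) hnt

lemma pv_update_insert_list {ν : Type} (l : List (Int × ν)) :
    (l.map Prod.fst).Nodup → ∀ (k : Int) (v : ν) (d : PySem.Dict Int ν),
      d.update (((PySem.Dict.mk l).insert k v).items) = (d.update l).insert k v := by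
  induction l with
  | nil => intro _ k v d; rfl
  | cons ab t ih =>
    intro hnd k v d
    obtain ⟨a, b⟩ := ab
    simp only [List.map_cons, List.nodup_cons] at hnd
    obtain ⟨hat, hnt⟩ := hnd
    by_cases hk : k = a
    · subst hk
      have hc : (PySem.Dict.mk ((k, b) :: t)).contains k = true := by
        simp [PySem.Dict.contains_mk]
      have hitems : ((PySem.Dict.mk ((k, b) :: t)).insert k v).items = (k, v) :: t := by
        simp only [PySem.Dict.items_insert, hc, if_true]
        simp only [List.map_cons, beq_self_eq_true, if_true]
        rw [pv_map_replace_eq_self k v t (by intro p hp e; exact hat (e ▸ List.mem_map_of_mem hp))]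
      rw [hitems]
      rw [show d.update ((k, v) :: t) = (d.insert k v).update t from rfl,
          show d.update ((k, b) :: t) = (d.insert k b).update t from rfl]
      rw [pv_update_insert_left t (d.insert k b) k v (by simp) hat,
          PySem.Dict.insert_insert_self]
    · rw [pv_items_insert_cons k a v b t hk]
      rw [show d.update ((a, b) :: ((PySem.Dict.mk t).insert k v).items)
            = (d.insert a b).update (((PySem.Dict.mk t).insert k v).items) from rfl,
          show d.update ((a, b) :: t) = (d.insert a b).update t from rfl]
      exact ih hnt k v (d.insert a b)

lemma pv_update_insert {ν : Type} (s : PySem.Dict Int ν) (hs : (s.items.map Prod.fst).Nodup)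
    (k : Int) (v : ν) (d : PySem.Dict Int ν) :
    d.update ((s.insert k v).items) = (d.update s.items).insert k v := by
  obtain ⟨l⟩ := s
  exact pv_update_insert_list l hs k v d

lemma pv_update_update {ν : Type} (rf : List (Int × ν)) :
    ∀ (s : PySem.Dict Int ν), (s.items.map Prod.fst).Nodup →
      ∀ (d : PySem.Dict Int ν),
        d.update ((s.update rf).items) = (d.update s.items).update rf := by
  induction rf with
  | nil => intro s _ d; rfl
  | cons kv r ih =>
    intro s hs d
    rw [show s.update (kv :: r) = (s.insert kv.1 kv.2).update r from rfl]
    have hnd : ((s.insert kv.1 kv.2).items.map Prod.fst).Nodup := by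
      have := PySem.Dict.nodup_keys_insert s kv.1 kv.2 (by simpa [PySem.Dict.keys] using hs)
      simpa [PySem.Dict.keys] using this
    rw [ih (s.insert kv.1 kv.2) hnd d, pv_update_insert s hs kv.1 kv.2 d]
    rfl

lemma pvLevel_nil (ms : List (Int × List Int)) : ∀ dims, pvLevel ms dims [] = [] := by
  intro dims; induction dims with
  | nil => rfl
  | cons d t ih => simpa [pvLevel] using ih

lemma pvLevel_append (ms : List (Int × List Int)) :
    ∀ (dims : List Int) (cs cs' : List PVC),
      pvLevel ms dims (cs ++ cs') = pvLevel ms dims cs ++ pvLevel ms dims cs' := by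
  intro dims
  induction dims with
  | nil => intro cs cs'; rfl
  | cons d t ih => intro cs cs'; simp [pvLevel, List.flatMap_append] at ih ⊢; exact ih _ _

lemma pvLevel_flatten (ms : List (Int × List Int)) (dims : List Int) :
    ∀ (cs : List PVC), pvLevel ms dims cs = cs.flatMap (fun c => pvLevel ms dims [c]) := by
  intro cs
  induction cs with
  | nil => simp [pvLevel_nil]
  | cons c t ih =>
    have : (c :: t) = [c] ++ t := rfl
    rw [this, pvLevel_append, ih]; simp

lemma pv_alt_eq (ms : List (Int × List Int)) (dims : List Int) (limit : Int) :
    generate_valid_multidim_factors_alt ms dims limit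
      = (pvLevel ms dims [([], [], limit)]).map (fun c => (c.1, c.2.1)) := by
  have hinner : ∀ (d : Int) (c : PVC) (nc : List PVC),
      ((get_all_divisors_with_factors (((PySem.Dict.mk ms).get? d).getD [])).items).foldl
        (fun new_combos sf =>
          if sf.1 > c.2.2 then new_combos
          else new_combos ++ [(c.1 ++ (if sf.1 > 1 then [(d, sf.1, false)] else []),
                               ((PySem.Dict.mk c.2.1).insert d sf.2).items,
                               PySem.Int.floordiv c.2.2 sf.1)]) nc
        = nc ++ pvF ms d c := by
    intro d c nc
    rw [pv_foldl_if_skip (fun sf : Int × List Int => sf.1 > c.2.2)]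
    rfl
  have houter : ∀ (cs : List PVC) (d : Int),
      cs.foldl (fun new_combos c =>
        ((get_all_divisors_with_factors (((PySem.Dict.mk ms).get? d).getD [])).items).foldl
          (fun new_combos sf =>
            if sf.1 > c.2.2 then new_combos
            else new_combos ++ [(c.1 ++ (if sf.1 > 1 then [(d, sf.1, false)] else []),
                                 ((PySem.Dict.mk c.2.1).insert d sf.2).items,
                                 PySem.Int.floordiv c.2.2 sf.1)]) new_combos) []
        = cs.flatMap (pvF ms d) := by
    intro cs d
    simp only [hinner]
    rw [PySem.List.foldl_append_eq_flatMap]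
    rfl
  unfold generate_valid_multidim_factors_alt pvLevel
  simp only [houter]

lemma pv_main (ms : List (Int × List Int)) :
    ∀ (dims : List Int) (c : PVC),
      (pvLevel ms dims [c]).map (fun c => (c.1, c.2.1))
        = (generate_valid_multidim_factors ms dims c.2.2).map
            (fun r => (c.1 ++ r.1, ((PySem.Dict.mk c.2.1).update r.2).items)) := by
  intro dims
  induction dims with
  | nil =>
    intro c
    simp [pvLevel, generate_valid_multidim_factors]
    rfl
  | cons d rest ih =>
    intro c
    have hstep : pvLevel ms (d :: rest) [c] = pvLevel ms rest (pvF ms d c) := by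
      simp [pvLevel]
    rw [hstep, pvLevel_flatten, List.map_flatMap]
    simp only [ih]
    -- unfold A at (d :: rest) and turn its loop into a flatMap
    rw [show generate_valid_multidim_factors ms (d :: rest) c.2.2
          = ((get_all_divisors_with_factors (((PySem.Dict.mk ms).get? d).getD [])).items).foldl
              (fun acc sf =>
                if sf.1 > c.2.2 then acc
                else acc ++ (generate_valid_multidim_factors ms rest (PySem.Int.floordiv c.2.2 sf.1)).map
                  (fun rr => ((if sf.1 > 1 then [(d, sf.1, false)] else []) ++ rr.1,
                              ((PySem.Dict.mk [(d, sf.2)]).update rr.2).items))) []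
        from by simp [generate_valid_multidim_factors]]
    rw [pv_foldl_if_skip (fun sf : Int × List Int => sf.1 > c.2.2), List.nil_append,
        List.map_flatMap]
    unfold pvF
    rw [List.flatMap_assoc]
    apply List.flatMap_congr
    intro sf _
    by_cases hlim : sf.1 > c.2.2
    · simp [hlim]
    · simp only [hlim, if_false, List.flatMap_cons, List.flatMap_nil, List.append_nil,
        List.map_map]
      apply List.map_congr_left
      intro r _
      refine Prod.ext ?_ ?_
      · simp [List.append_assoc]
      · show (((PySem.Dict.mk c.2.1).insert d sf.2).update r.2).items
          = (((PySem.Dict.mk c.2.1).update ((PySem.Dict.mk [(d, sf.2)]).update r.2).items)).items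
        rw [pv_update_update r.2 (PySem.Dict.mk [(d, sf.2)]) (by simp) (PySem.Dict.mk c.2.1)]
        rfl

lemma pv_a_nodup (ms : List (Int × List Int)) :
    ∀ (dims : List Int) (limit : Int) r, r ∈ generate_valid_multidim_factors ms dims limit →
      (r.2.map Prod.fst).Nodup := by
  intro dims limit r hr
  cases dims with
  | nil =>
    simp [generate_valid_multidim_factors] at hr
    simp [hr]
  | cons d rest =>
    rw [show generate_valid_multidim_factors ms (d :: rest) limit
          = ((get_all_divisors_with_factors (((PySem.Dict.mk ms).get? d).getD [])).items).foldl
              (fun acc sf =>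
                if sf.1 > limit then acc
                else acc ++ (generate_valid_multidim_factors ms rest (PySem.Int.floordiv limit sf.1)).map
                  (fun rr => ((if sf.1 > 1 then [(d, sf.1, false)] else []) ++ rr.1,
                              ((PySem.Dict.mk [(d, sf.2)]).update rr.2).items))) []
        from by simp [generate_valid_multidim_factors],
        pv_foldl_if_skip (fun sf : Int × List Int => sf.1 > limit), List.nil_append] at hr
    rw [List.mem_flatMap] at hr
    obtain ⟨sf, _, hmem⟩ := hr
    by_cases hlim : sf.1 > limit
    · simp [hlim] at hmem
    · simp only [hlim, if_false, List.mem_map] at hmem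
      obtain ⟨rr, _, hrr⟩ := hmem
      subst hrr
      have := PySem.Dict.nodup_keys_update (PySem.Dict.mk [(d, sf.2)]) rr.2
        (by simp [PySem.Dict.keys])
      simpa [PySem.Dict.keys] using this

-- ===== VERDICT (by name: the statement is the Claim_ definition above) =====
theorem generate_valid_multidim_factors_spec : Claim_equal_generate_valid_multidim_factors := by
  intro ms dims limit _dom _pre
  unfold Spec_generate_valid_multidim_factors
  rw [pv_alt_eq, pv_main ms dims ([], [], limit)]
  have : ∀ r ∈ generate_valid_multidim_factors ms dims limit,
      ((([], [], limit) : PVC).1 ++ r.1,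
        ((PySem.Dict.mk (([], [], limit) : PVC).2.1).update r.2).items) = r := by
    intro r hr
    refine Prod.ext ?_ ?_
    · simp
    · show ((PySem.Dict.mk []).update r.2).items = r.2
      have := PySem.Dict.items_foldl_insert_fresh r.2 Prod.fst Prod.snd (PySem.Dict.mk [])
        (by intro a _; simp [PySem.Dict.contains_mk]) (pv_a_nodup ms dims limit r hr)
      simpa [PySem.Dict.update] using this
  rw [List.map_congr_left this, List.map_id']
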